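-- pv_equiv track=rewrite | github.com/S4yfullXD/super_intelligent_scanner | core/scanner_engine.py | _is_suspicious_path
-- ===== SOURCE A (Python) =====
-- def _is_suspicious_path(path: str) -> bool:
--     """Check if path is suspicious dan akan trigger WAF"""
--     suspicious_patterns = [
--         '..', '...', '////', '.bak', '.old', '.txt', '.xml',
--         '.json', '.js.map', '.css.map', '.env', 'config.json',
--         'package.json', 'composer.json', 'wp-', 'laravel/',
--         '//', '....', '.sql', '.zip', '.tar', '.gz',
--         '.log', '.tmp', '.temp', '.swp', '.swo'
--     ]
--     return any(pattern in path for pattern in suspicious_patterns)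
-- ===== SOURCE B (Python) =====
-- # B: dispatch on the first character via a dict built once, then one
-- # positional pass testing only the tails filed under that character.
-- _BY_FIRST = {
--     '.': ['.', '..', 'bak', 'old', 'txt', 'xml', 'json', 'js.map',
--           'css.map', 'env', '...', 'sql', 'zip', 'tar', 'gz',
--           'log', 'tmp', 'temp', 'swp', 'swo'],
--     '/': ['///', '/'],
--     'c': ['onfig.json', 'omposer.json'],
--     'p': ['ackage.json'],
--     'w': ['p-'],
--     'l': ['aravel/'],
-- }
--
-- def _is_suspicious_path(path: str) -> bool:
--     """Check if path is suspicious dan akan trigger WAF"""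
--     for i, ch in enumerate(path):
--         for tail in _BY_FIRST.get(ch, ()):
--             if path.startswith(tail, i + 1):
--                 return True
--     return False
-- ===== Notes on version B (the rewrite author's own statement) =====
-- stated objective: alternative
-- what changed: Replaces the 27 independent per-pattern substring scans with a dict built once keying pattern tails by their first character, consulted in a single positional pass over the path (only tails filed under the current character are tested).
import Mathlib
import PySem

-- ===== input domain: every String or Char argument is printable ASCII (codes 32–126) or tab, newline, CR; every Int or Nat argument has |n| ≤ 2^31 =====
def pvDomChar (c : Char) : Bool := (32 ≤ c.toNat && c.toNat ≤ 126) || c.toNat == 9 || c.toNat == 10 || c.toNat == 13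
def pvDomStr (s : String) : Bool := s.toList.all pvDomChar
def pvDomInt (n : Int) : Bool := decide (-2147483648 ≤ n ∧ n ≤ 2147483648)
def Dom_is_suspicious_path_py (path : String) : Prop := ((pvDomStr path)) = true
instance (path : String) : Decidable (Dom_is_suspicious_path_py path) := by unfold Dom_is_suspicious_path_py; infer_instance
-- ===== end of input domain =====

-- B replaces the 27 independent substring scans by a dict keyed on the first pattern
-- character, consulted once per position in a single pass; objective: alternative.

-- ===== PORT A =====
-- A's local list of suspicious patterns (same order)
def suspPatternsA : List String :=
  ["..", "...", "////", ".bak", ".old", ".txt", ".xml",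
   ".json", ".js.map", ".css.map", ".env", "config.json",
   "package.json", "composer.json", "wp-", "laravel/",
   "//", "....", ".sql", ".zip", ".tar", ".gz",
   ".log", ".tmp", ".temp", ".swp", ".swo"]

def is_suspicious_path_py (path : String) : Bool :=
  suspPatternsA.any (fun pattern => PySem.Str.isIn pattern path)

-- ===== PORT B =====
-- Source B's _BY_FIRST dict: first character ↦ list of pattern tails (as char lists)
def byFirstGroups : List (Char × List (List Char)) :=
  [('.', [['.'], ['.', '.'], ['b','a','k'], ['o','l','d'], ['t','x','t'], ['x','m','l'],
          ['j','s','o','n'], ['j','s','.','m','a','p'], ['c','s','s','.','m','a','p'],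
          ['e','n','v'], ['.','.','.'], ['s','q','l'], ['z','i','p'], ['t','a','r'],
          ['g','z'], ['l','o','g'], ['t','m','p'], ['t','e','m','p'], ['s','w','p'],
          ['s','w','o']]),
   ('/', [['/','/','/'], ['/']]),
   ('c', [['o','n','f','i','g','.','j','s','o','n'], ['o','m','p','o','s','e','r','.','j','s','o','n']]),
   ('p', [['a','c','k','a','g','e','.','j','s','o','n']]),
   ('w', [['p','-']]),
   ('l', [['a','r','a','v','e','l','/']])]

-- _BY_FIRST.get(ch, ()) : first-match association lookup, default empty
def byFirst (c : Char) : List (List Char) :=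
  ((byFirstGroups.find? (fun pr => pr.1 == c)).map (·.2)).getD []

-- Source B's loop: at each position, test only the tails filed under that character
def altScan : List Char → Bool
  | [] => false
  | c :: t => if (byFirst c).any (fun tail => tail.isPrefixOf t) then true else altScan t

def is_suspicious_path_py_alt (path : String) : Bool := altScan path.toList

-- ===== PRECONDITION & SPEC =====
def Spec_is_suspicious_path_py (path : String) (out : Bool) : Prop := out = is_suspicious_path_py_alt path
instance (path : String) (out : Bool) : Decidable (Spec_is_suspicious_path_py path out) := by unfold Spec_is_suspicious_path_py; infer_instance

-- ===== CLAIM (what is proved, stated in full; the proofs are below) =====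
def Claim_equal_is_suspicious_path_py : Prop := ∀ (path : String), Dom_is_suspicious_path_py path → Spec_is_suspicious_path_py path (is_suspicious_path_py path)

-- ===== LEMMAS AND PROOFS =====

def patsChars : List (List Char) := suspPatternsA.map String.toList

-- every (key, tail) of the groups reassembles into a pattern of A's list
theorem groups_sound : ∀ pr ∈ byFirstGroups, ∀ tl ∈ pr.2, (pr.1 :: tl) ∈ patsChars := by
  decide

-- every pattern of A's list is nonempty and its tail is filed under its head
theorem groups_complete :
    ∀ p ∈ patsChars, p.tail ∈ byFirst (p.headD ' ') := by
  decide

theorem mem_byFirst {c : Char} {tl : List Char} (h : tl ∈ byFirst c) :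
    (c :: tl) ∈ patsChars := by
  unfold byFirst at h
  cases hf : byFirstGroups.find? (fun pr => pr.1 == c) with
  | none => rw [hf] at h; simp at h
  | some pr =>
      rw [hf] at h
      simp only [Option.map_some, Option.getD_some] at h
      have hmem := List.mem_of_find?_eq_some hf
      have hkey : pr.1 = c := by
        have := List.find?_some hf
        simpa using this
      have := groups_sound pr hmem tl h
      rwa [hkey] at this

theorem patsChars_ne_nil : ∀ p ∈ patsChars, p ≠ [] := by decide

-- per-position step: the grouped test fires iff some pattern is a prefix here
theorem step_iff (c : Char) (t : List Char) :
    ((byFirst c).any (fun tail => tail.isPrefixOf t) = true) ↔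
      ∃ p ∈ patsChars, p <+: (c :: t) := by
  constructor
  · intro h
    rcases List.any_eq_true.mp h with ⟨tl, htl, hpre⟩
    exact ⟨c :: tl, mem_byFirst htl,
      List.cons_prefix_cons.mpr ⟨rfl, List.isPrefixOf_iff_prefix.mp hpre⟩⟩
  · rintro ⟨p, hp, hpre⟩
    have hm := groups_complete p hp
    cases p with
    | nil => exact absurd rfl (patsChars_ne_nil [] hp)
    | cons c' tl =>
        simp only [List.headD_cons, List.tail_cons] at hm
        rcases List.cons_prefix_cons.mp hpre with ⟨rfl, htpre⟩
        exact List.any_eq_true.mpr ⟨tl, hm, List.isPrefixOf_iff_prefix.mpr htpre⟩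

theorem altScan_iff (s : List Char) :
    altScan s = true ↔ ∃ p ∈ patsChars, p <:+: s := by
  induction s with
  | nil =>
      simp only [altScan]
      constructor
      · intro h; cases h
      · rintro ⟨p, hp, hinf⟩
        exact absurd (List.eq_nil_of_infix_nil hinf) (patsChars_ne_nil p hp)
  | cons c t ih =>
      simp only [altScan]
      by_cases h : (byFirst c).any (fun tail => tail.isPrefixOf t) = true
      · simp only [h, if_true, true_iff]
        rcases (step_iff c t).mp h with ⟨p, hp, hpre⟩
        exact ⟨p, hp, hpre.isInfix⟩
      · rw [Bool.not_eq_true] at h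
        simp only [h, Bool.false_eq_true, if_false]
        rw [ih]
        constructor
        · rintro ⟨p, hp, hinf⟩; exact ⟨p, hp, hinf.trans (List.suffix_cons c t).isInfix⟩
        · rintro ⟨p, hp, hinf⟩
          rcases List.infix_cons_iff.mp hinf with hpre | hinf'
          · have : (byFirst c).any (fun tail => tail.isPrefixOf t) = true :=
              (step_iff c t).mpr ⟨p, hp, hpre⟩
            rw [this] at h; cases h
          · exact ⟨p, hp, hinf'⟩

theorem ports_agree (path : String) :
    is_suspicious_path_py path = is_suspicious_path_py_alt path := by
  unfold is_suspicious_path_py is_suspicious_path_py_alt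
  rcases hB : altScan path.toList with _ | _
  · rw [Bool.eq_false_iff] at hB ⊢
    intro hA
    rcases List.any_eq_true.mp hA with ⟨p, hp, hin⟩
    exact hB ((altScan_iff _).mpr
      ⟨p.toList, List.mem_map_of_mem hp, (PySem.Str.isIn_iff_infix _ _).mp hin⟩)
  · rcases (altScan_iff _).mp hB with ⟨q, hq, hinf⟩
    rcases List.mem_map.mp hq with ⟨p, hp, rfl⟩
    exact List.any_eq_true.mpr ⟨p, hp, (PySem.Str.isIn_iff_infix _ _).mpr hinf⟩

-- ===== VERDICT (by name: the statement is the Claim_ definition above) =====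
theorem is_suspicious_path_py_spec : Claim_equal_is_suspicious_path_py := by
  intro path _
  exact ports_agree path
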